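-- pv_equiv track=rewrite | github.com/PedroM2626/Multi-AutoML-Interface | src/pipeline_parser.py | extract_autogluon_leaderboard_text
-- ===== SOURCE A (Python) =====
-- from typing import Optional
--
-- def extract_autogluon_leaderboard_text(logs: list[str]) -> Optional[str]:
--     """Extract leaderboard table text from AutoGluon logs."""
--     rows = []
--     capture = False
--     for line in logs:
--         if "model" in line.lower() and "score_val" in line.lower():
--             capture = True
--         if capture:
--             rows.append(line)
--             if len(rows) > 15:
--                 break
--     return "\n".join(rows) if rows else None
-- ===== SOURCE B (Python) =====
-- from typing import Optional
--
-- def extract_autogluon_leaderboard_text(logs: list[str]) -> Optional[str]: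
--     """Extract leaderboard table text from AutoGluon logs."""
--     start = next((i for i, line in enumerate(logs)
--                   if "model" in line.lower() and "score_val" in line.lower()), None)
--     if start is None:
--         return None
--     return "\n".join(logs[start:start + 16])
-- ===== Notes on version B (the rewrite author's own statement) =====
-- stated objective: simpler
-- what changed: Replaces the capture-flag accumulator loop (append rows, break past 15) with locate-then-window: find the first matching line's index, then slice logs[start:start+16] and join.
import Mathlib
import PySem

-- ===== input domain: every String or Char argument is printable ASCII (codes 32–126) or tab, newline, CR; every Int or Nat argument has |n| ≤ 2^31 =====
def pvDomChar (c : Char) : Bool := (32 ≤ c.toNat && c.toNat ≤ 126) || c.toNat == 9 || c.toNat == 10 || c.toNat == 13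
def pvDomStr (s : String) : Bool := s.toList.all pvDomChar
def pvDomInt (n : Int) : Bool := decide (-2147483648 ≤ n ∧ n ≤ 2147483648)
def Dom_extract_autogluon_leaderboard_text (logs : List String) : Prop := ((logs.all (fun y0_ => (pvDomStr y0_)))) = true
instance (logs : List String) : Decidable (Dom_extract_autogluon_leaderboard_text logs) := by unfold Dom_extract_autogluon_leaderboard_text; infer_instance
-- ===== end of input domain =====

-- B replaces A's capture-flag accumulator loop with locate-then-window (find first match, slice 16 lines, join); objective: simpler.

-- ===== PORT A =====
-- '"model" in line.lower() and "score_val" in line.lower()'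
def pvHit (line : String) : Bool :=
  PySem.Str.isIn "model" (PySem.Str.lower line) && PySem.Str.isIn "score_val" (PySem.Str.lower line)

-- the for-loop of A: state is (rows, capture); 'break' when len(rows) > 15
def pvALoop (lines : List String) (rows : List String) (capture : Bool) : List String :=
  match lines with
  | [] => rows
  | line :: rest =>
    let capture := if pvHit line then true else capture
    if capture then
      let rows := rows ++ [line]
      if rows.length > 15 then rows else pvALoop rest rows capture
    else
      pvALoop rest rows capture

def extract_autogluon_leaderboard_text (logs : List String) : Option String :=
  let rows := pvALoop logs [] false
  if rows ≠ [] then some (PySem.Str.join "\n" rows) else none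

-- ===== PORT B =====
def extract_autogluon_leaderboard_text_alt (logs : List String) : Option String :=
  match logs.findIdx? pvHit with
  | none => none
  | some start =>
      some (PySem.Str.join "\n" (PySem.List.slice logs (some (start : Int)) (some ((start : Int) + 16))))

-- ===== PRECONDITION & SPEC =====
def Spec_extract_autogluon_leaderboard_text (logs : List String) (out : Option String) : Prop := out = extract_autogluon_leaderboard_text_alt logs
instance (logs : List String) (out : Option String) : Decidable (Spec_extract_autogluon_leaderboard_text logs out) := by unfold Spec_extract_autogluon_leaderboard_text; infer_instance

-- ===== CLAIM (what is proved, stated in full; the proofs are below) =====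
def Claim_equal_extract_autogluon_leaderboard_text : Prop := ∀ (logs : List String), Dom_extract_autogluon_leaderboard_text logs → Spec_extract_autogluon_leaderboard_text logs (extract_autogluon_leaderboard_text logs)

-- ===== LEMMAS AND PROOFS =====

-- once capture is true, the loop just takes the next (16 - |rows|) lines
theorem pvALoop_capture (lines : List String) (rows : List String) (h : rows.length ≤ 15) :
    pvALoop lines rows true = rows ++ lines.take (16 - rows.length) := by
  induction lines generalizing rows with
  | nil => simp [pvALoop]
  | cons line rest ih =>
    have hstep : pvALoop (line :: rest) rows true =
        (if (rows ++ [line]).length > 15 then rows ++ [line] else pvALoop rest (rows ++ [line]) true) := by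
      simp [pvALoop]
    rw [hstep]
    by_cases h15 : rows.length = 15
    · rw [if_pos (by simp [h15])]
      have h1 : 16 - rows.length = 1 := by omega
      simp [h1, List.take_succ_cons]
    · rw [if_neg (by simp only [List.length_append, List.length_singleton]; omega), ih _ (by simp only [List.length_append, List.length_singleton]; omega)]
      have hsucc : 16 - rows.length = (15 - rows.length) + 1 := by omega
      rw [hsucc, List.take_succ_cons]
      have h2 : 16 - (rows ++ [line]).length = 15 - rows.length := by simp only [List.length_append, List.length_singleton]; omega
      rw [h2]
      simp

-- before any hit, the loop result is the 16-line window at the first hit (or [] if none)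
theorem pvALoop_idle (lines : List String) :
    pvALoop lines [] false =
      match lines.findIdx? pvHit with
      | none => []
      | some i => (lines.drop i).take 16 := by
  induction lines with
  | nil => simp [pvALoop]
  | cons line rest ih =>
    by_cases hh : pvHit line
    · have hstep : pvALoop (line :: rest) [] false = pvALoop rest [line] true := by
        simp [pvALoop, hh]
      rw [hstep, pvALoop_capture rest [line] (by simp), List.findIdx?_cons, if_pos hh]
      simp [List.take_succ_cons]
    · have hstep : pvALoop (line :: rest) [] false = pvALoop rest [] false := by
        simp [pvALoop, hh]
      rw [hstep, ih, List.findIdx?_cons, if_neg (by simp [hh])]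
      cases hf : rest.findIdx? pvHit <;> simp

-- the window at a found index is nonempty
theorem pvWindow_ne_nil (logs : List String) (i : Nat) (hf : logs.findIdx? pvHit = some i) :
    (logs.drop i).take 16 ≠ [] := by
  have hi : i < logs.length := List.findIdx?_eq_some_iff_findIdx_eq.mp hf |>.1
  intro h
  rcases List.take_eq_nil_iff.mp h with h0 | h0
  · exact absurd h0 (by norm_num)
  · have := List.drop_eq_nil_iff.mp h0
    omega

-- ===== VERDICT (by name: the statement is the Claim_ definition above) =====
theorem extract_autogluon_leaderboard_text_spec : Claim_equal_extract_autogluon_leaderboard_text := by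
  intro logs _
  unfold Spec_extract_autogluon_leaderboard_text extract_autogluon_leaderboard_text
    extract_autogluon_leaderboard_text_alt
  rw [pvALoop_idle]
  cases hf : logs.findIdx? pvHit with
  | none => simp
  | some i =>
    have hne := pvWindow_ne_nil logs i hf
    dsimp only
    rw [if_pos hne]
    rw [show ((i : Int) + 16) = (((i + 16 : Nat) : Int)) by push_cast; ring,
      PySem.List.slice_natCast]
    have h16 : i + 16 - i = 16 := by omega
    rw [h16]
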